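-- pv_equiv track=rewrite | github.com/invertome/hcr-prober | hcr_prober/isoform_analyzer.py | invert_intervals
-- ===== SOURCE A (Python) =====
-- def merge_intervals(intervals):
--     if not intervals: return []
--     intervals.sort(key=lambda x: x[0])
--     merged = [intervals[0]]
--     for current_start, current_end in intervals[1:]:
--         last_start, last_end = merged[-1]
--         if current_start <= last_end:
--             merged[-1] = (last_start, max(last_end, current_end))
--         else:
--             merged.append((current_start, current_end))
--     return merged
--
-- def invert_intervals(sequence_length, intervals_to_mask):
--     if not intervals_to_mask: return [(0, sequence_length)]
--     inverted, current_pos = [], 0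
--     sorted_intervals = merge_intervals(intervals_to_mask)
--     for start, end in sorted_intervals:
--         if start > current_pos: inverted.append((current_pos, start))
--         current_pos = max(current_pos, end)
--     if current_pos < sequence_length: inverted.append((current_pos, sequence_length))
--     return inverted
-- ===== SOURCE B (Python) =====
-- def invert_intervals(sequence_length, intervals_to_mask):
--     # Single pass: sort in place (as A does via merge_intervals), then one scan
--     # whose max() logic absorbs overlapping intervals, so no merge pass is needed.
--     if not intervals_to_mask: return [(0, sequence_length)]
--     intervals_to_mask.sort(key=lambda x: x[0])
--     inverted, current_pos = [], 0
--     for start, end in intervals_to_mask: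
--         if start > current_pos:
--             inverted.append((current_pos, start))
--         current_pos = max(current_pos, end)
--     if current_pos < sequence_length:
--         inverted.append((current_pos, sequence_length))
--     return inverted
-- ===== Notes on version B (the rewrite author's own statement) =====
-- stated objective: simpler
-- what changed: B deletes the merge_intervals helper and its whole merging pass: it sorts once and computes the complement in a single scan, whose max(current_pos, end) update already absorbs overlapping intervals.
import Mathlib
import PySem

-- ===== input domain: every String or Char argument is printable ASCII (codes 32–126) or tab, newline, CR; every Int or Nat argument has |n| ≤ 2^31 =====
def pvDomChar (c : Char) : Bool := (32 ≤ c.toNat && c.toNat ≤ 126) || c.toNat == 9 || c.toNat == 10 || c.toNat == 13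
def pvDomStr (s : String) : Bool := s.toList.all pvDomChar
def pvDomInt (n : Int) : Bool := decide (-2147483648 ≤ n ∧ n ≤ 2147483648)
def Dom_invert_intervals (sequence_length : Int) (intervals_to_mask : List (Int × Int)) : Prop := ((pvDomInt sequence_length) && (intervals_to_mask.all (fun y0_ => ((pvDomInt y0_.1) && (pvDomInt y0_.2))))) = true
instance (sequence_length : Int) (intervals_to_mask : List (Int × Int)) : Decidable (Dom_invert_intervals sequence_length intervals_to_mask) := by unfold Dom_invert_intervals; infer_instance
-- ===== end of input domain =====

-- B removes the merge_intervals helper: one sort + one scan (the scan's max already absorbs overlaps); simpler.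
-- Both A and B sort intervals_to_mask in place in Python; the equivalence proved here is about the return value.


-- ===== PORT A =====
-- the 'for current_start, current_end in intervals[1:]' loop of merge_intervals,
-- carrying the growing 'merged' list (merged[-1] read via getLastD, rewritten via dropLast ++ [_])
def pvMergeLoop : List (Int × Int) → List (Int × Int) → List (Int × Int)
  | merged, [] => merged
  | merged, (current_start, current_end) :: rest =>
    let last := merged.getLastD (0, 0)
    if current_start ≤ last.2 then
      pvMergeLoop (merged.dropLast ++ [(last.1, max last.2 current_end)]) rest
    else
      pvMergeLoop (merged ++ [(current_start, current_end)]) rest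

def merge_intervals (intervals : List (Int × Int)) : List (Int × Int) :=
  if intervals = [] then []
  else
    let s := PySem.List.sorted intervals (fun x => x.1)
    pvMergeLoop [s.headI] s.tail

-- body of A's 'for start, end in sorted_intervals' loop; state = (inverted, current_pos)
def pvScanStepA (st : List (Int × Int) × Int) (p : Int × Int) : List (Int × Int) × Int :=
  (if p.1 > st.2 then st.1 ++ [(st.2, p.1)] else st.1, max st.2 p.2)

def invert_intervals (sequence_length : Int) (intervals_to_mask : List (Int × Int)) : List (Int × Int) :=
  if intervals_to_mask = [] then [(0, sequence_length)]
  else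
    let sorted_intervals := merge_intervals intervals_to_mask
    let r := sorted_intervals.foldl pvScanStepA ([], 0)
    if r.2 < sequence_length then r.1 ++ [(r.2, sequence_length)] else r.1

-- ===== PORT B =====
def invert_intervals_alt (sequence_length : Int) (intervals_to_mask : List (Int × Int)) : List (Int × Int) :=
  if intervals_to_mask = [] then [(0, sequence_length)]
  else
    let s := PySem.List.sorted intervals_to_mask (fun x => x.1)
    -- B's single loop, inline: state = (inverted, current_pos)
    let r := s.foldl (fun st p =>
      (if p.1 > st.2 then st.1 ++ [(st.2, p.1)] else st.1, max st.2 p.2)) ([], 0)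
    if r.2 < sequence_length then r.1 ++ [(r.2, sequence_length)] else r.1

-- ===== PRECONDITION & SPEC =====
def Spec_invert_intervals (sequence_length : Int) (intervals_to_mask : List (Int × Int)) (out : List (Int × Int)) : Prop := out = invert_intervals_alt sequence_length intervals_to_mask
instance (sequence_length : Int) (intervals_to_mask : List (Int × Int)) (out : List (Int × Int)) : Decidable (Spec_invert_intervals sequence_length intervals_to_mask out) := by unfold Spec_invert_intervals; infer_instance

-- ===== CLAIM (what is proved, stated in full; the proofs are below) =====
def Claim_equal_invert_intervals : Prop := ∀ (sequence_length : Int) (intervals_to_mask : List (Int × Int)), Dom_invert_intervals sequence_length intervals_to_mask → Spec_invert_intervals sequence_length intervals_to_mask (invert_intervals sequence_length intervals_to_mask)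

-- ===== LEMMAS AND PROOFS =====

-- pvMergeLoop only touches the last element of its accumulator: a fixed prefix factors out.
theorem pvMergeLoop_append (rest : List (Int × Int)) :
    ∀ (acc : List (Int × Int)) (l : Int × Int),
      pvMergeLoop (acc ++ [l]) rest = acc ++ pvMergeLoop [l] rest := by
  induction rest with
  | nil => intro acc l; rfl
  | cons p rest ih =>
    intro acc l
    obtain ⟨cs, ce⟩ := p
    rw [show pvMergeLoop (acc ++ [l]) ((cs, ce) :: rest)
          = if cs ≤ ((acc ++ [l]).getLastD (0, 0)).2 then
              pvMergeLoop ((acc ++ [l]).dropLast ++ [(((acc ++ [l]).getLastD (0, 0)).1,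
                max ((acc ++ [l]).getLastD (0, 0)).2 ce)]) rest
            else pvMergeLoop (acc ++ [l] ++ [(cs, ce)]) rest from rfl,
        show pvMergeLoop [l] ((cs, ce) :: rest)
          = if cs ≤ l.2 then pvMergeLoop [(l.1, max l.2 ce)] rest
            else pvMergeLoop ([l] ++ [(cs, ce)]) rest from rfl,
        List.getLastD_concat, List.dropLast_concat]
    by_cases h : cs ≤ l.2
    · simp only [if_pos h, ih]
    · simp only [if_neg h]
      rw [ih (acc ++ [l]), ih [l]]
      simp

-- Key: scanning the merged list equals scanning the sorted list directly —
-- the scan's max-update absorbs each interval the merge pass would have absorbed.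
theorem scan_merge (rest : List (Int × Int)) :
    ∀ (l : Int × Int) (st : List (Int × Int) × Int),
      (∀ p ∈ rest, l.1 ≤ p.1) →
      rest.Pairwise (fun a b => a.1 ≤ b.1) →
      (pvMergeLoop [l] rest).foldl pvScanStepA st = (l :: rest).foldl pvScanStepA st := by
  induction rest with
  | nil => intro l st _ _; rfl
  | cons p rest ih =>
    intro l st hle hpw
    obtain ⟨cs, ce⟩ := p
    have hlcs : l.1 ≤ cs := hle _ (List.mem_cons_self ..)
    have hpw' := (List.pairwise_cons.mp hpw).2
    have hcsle : ∀ q ∈ rest, cs ≤ q.1 := fun q hq => (List.pairwise_cons.mp hpw).1 q hq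
    rw [show pvMergeLoop [l] ((cs, ce) :: rest)
          = if cs ≤ l.2 then pvMergeLoop [(l.1, max l.2 ce)] rest
            else pvMergeLoop ([l] ++ [(cs, ce)]) rest from rfl]
    by_cases h : cs ≤ l.2
    · simp only [if_pos h]
      rw [ih (l.1, max l.2 ce) st (fun q hq => le_trans hlcs (hcsle q hq)) hpw']
      -- remaining: one step of the absorbed interval equals two scan steps
      simp only [List.foldl_cons]
      congr 1
      obtain ⟨inv, cur⟩ := st
      simp only [pvScanStepA]
      have hno : ¬ cs > max cur l.2 := by omega
      simp only [if_neg hno, Prod.mk.injEq]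
      refine ⟨by simp, by omega⟩
    · simp only [if_neg h]
      rw [pvMergeLoop_append]
      simp only [List.foldl_cons, List.foldl_append, List.foldl_nil]
      rw [ih (cs, ce) (pvScanStepA st l) hcsle hpw']
      simp only [List.foldl_cons]

-- ===== VERDICT (by name: the statement is the Claim_ definition above) =====
theorem invert_intervals_spec : Claim_equal_invert_intervals := by
  intro L ivs _
  unfold Spec_invert_intervals invert_intervals invert_intervals_alt merge_intervals
  by_cases hnil : ivs = []
  · simp [hnil]
  · simp only [if_neg hnil]
    set s := PySem.List.sorted ivs (fun x => x.1) with hs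
    have hsnil : s ≠ [] := by
      simpa [hs, PySem.List.sorted_eq_nil_iff] using hnil
    obtain ⟨h, t, hst⟩ := List.exists_cons_of_ne_nil hsnil
    have hpw : s.Pairwise (fun a b => a.1 ≤ b.1) := PySem.List.sorted_pairwise ..
    rw [hst] at hpw ⊢
    simp only [List.headI, List.tail_cons]
    rw [show (fun (st : List (Int × Int) × Int) (p : Int × Int) =>
          (if p.1 > st.2 then st.1 ++ [(st.2, p.1)] else st.1, max st.2 p.2)) = pvScanStepA from rfl]
    rw [scan_merge t h ([], 0) (fun q hq => (List.pairwise_cons.mp hpw).1 q hq)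
        (List.pairwise_cons.mp hpw).2]
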